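-- pv_equiv track=rewrite | github.com/dbgnvan2/serp-main | Serp-compete/src/analysis.py | find_keyword_intersection
-- ===== SOURCE A (Python) =====
-- from typing import List, Set, Dict, Any
--
-- def find_keyword_intersection(competitor_keywords: Dict[str, Set[str]], client_keywords: Set[str]) -> Set[str]:
--     """
--     Flag keywords that all three (or all provided) rank for, but client doesn't.
--     """
--     if not competitor_keywords:
--         return set()
--
--     common_competitor_keywords = None
--     for domain, keywords in competitor_keywords.items():
--         if common_competitor_keywords is None:
--             common_competitor_keywords = keywords
--         else:
--             common_competitor_keywords = common_competitor_keywords.intersection(keywords)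
--
--     if common_competitor_keywords is None:
--         return set()
--
--     return common_competitor_keywords.difference(client_keywords)
-- ===== SOURCE B (Python) =====
-- def find_keyword_intersection(competitor_keywords, client_keywords):
--     n = len(competitor_keywords)
--     counts = {}
--     for keywords in competitor_keywords.values():
--         for kw in keywords:
--             counts[kw] = counts.get(kw, 0) + 1
--     return {kw for kw, c in counts.items()
--             if c == n and kw not in client_keywords}
-- ===== Notes on version B (the rewrite author's own statement) =====
-- stated objective: alternative
-- what changed: Instead of folding pairwise set intersections and subtracting the client set, B builds one frequency dict counting each keyword over all competitor sets and then keeps exactly the keywords whose count equals the number of competitors and that the client lacks; no intermediate intersection sets exist.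
import Mathlib
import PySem

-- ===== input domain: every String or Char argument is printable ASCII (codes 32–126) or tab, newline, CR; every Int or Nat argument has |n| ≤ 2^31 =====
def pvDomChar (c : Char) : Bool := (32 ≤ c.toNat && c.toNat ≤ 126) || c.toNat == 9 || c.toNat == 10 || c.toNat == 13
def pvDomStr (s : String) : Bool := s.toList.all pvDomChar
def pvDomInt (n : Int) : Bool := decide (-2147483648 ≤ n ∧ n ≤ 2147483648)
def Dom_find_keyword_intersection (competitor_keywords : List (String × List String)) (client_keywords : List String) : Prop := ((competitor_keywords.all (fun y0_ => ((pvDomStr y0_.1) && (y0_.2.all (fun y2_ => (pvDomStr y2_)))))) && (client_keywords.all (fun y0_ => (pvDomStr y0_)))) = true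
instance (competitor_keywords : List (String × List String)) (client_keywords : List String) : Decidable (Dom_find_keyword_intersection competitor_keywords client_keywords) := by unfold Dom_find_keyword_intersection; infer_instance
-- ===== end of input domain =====

-- B replaces A's chain of intermediate intersection sets by one frequency table
-- (dict counting every competitor keyword) filtered by count == number of
-- competitors and absence from the client set (objective: alternative).

-- ===== PORT A =====
-- fold over the dict items with an Option accumulator, mirroring A's None sentinel
def find_keyword_intersection (competitor_keywords : List (String × List String)) (client_keywords : List String) : List String :=
  if competitor_keywords.isEmpty then []
  else
    match competitor_keywords.foldl
        (fun (acc : Option (List String)) kv =>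
          match acc with
          | none => some kv.2
          | some s => some (PySem.Set.inter s kv.2)) none with
    | none => []
    | some s => PySem.Set.diff s client_keywords

-- ===== PORT B =====
-- nested counting loop into a dict, then the set comprehension over its items
def find_keyword_intersection_alt (competitor_keywords : List (String × List String)) (client_keywords : List String) : List String :=
  let n : Int := competitor_keywords.length
  let counts : PySem.Dict String Int :=
    competitor_keywords.foldl
      (fun d kv => kv.2.foldl (fun d kw => d.insert kw (d.getD kw 0 + 1)) d)
      PySem.Dict.empty
  PySem.Set.ofList
    ((counts.items.filter (fun p => p.2 == n && !(client_keywords.contains p.1))).map Prod.fst)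

-- ===== PRECONDITION & SPEC =====
-- Pre_ states the representation invariant of the type convention only: each competitor
-- value is a Python set, so its List String representation holds distinct elements.
-- No actual Python input (a dict of sets) falls outside it.
def Pre_find_keyword_intersection (competitor_keywords : List (String × List String)) (client_keywords : List String) : Prop :=
  ∀ kv ∈ competitor_keywords, kv.2.Nodup
instance (competitor_keywords : List (String × List String)) (client_keywords : List String) : Decidable (Pre_find_keyword_intersection competitor_keywords client_keywords) := by unfold Pre_find_keyword_intersection; infer_instance

def pvWitness_find_keyword_intersection : (List (String × List String)) × List String :=
  ([("a.com", ["seo", "ads"]), ("b.com", ["ads", "seo", "blog"])], ["ads"])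

def Spec_find_keyword_intersection (competitor_keywords : List (String × List String)) (client_keywords : List String) (out : List String) : Prop := out = find_keyword_intersection_alt competitor_keywords client_keywords
instance (competitor_keywords : List (String × List String)) (client_keywords : List String) (out : List String) : Decidable (Spec_find_keyword_intersection competitor_keywords client_keywords out) := by unfold Spec_find_keyword_intersection; infer_instance

-- ===== CLAIM (what is proved, stated in full; the proofs are below) =====
def Claim_equal_find_keyword_intersection : Prop := ∀ (competitor_keywords : List (String × List String)) (client_keywords : List String), Dom_find_keyword_intersection competitor_keywords client_keywords → Pre_find_keyword_intersection competitor_keywords client_keywords → Spec_find_keyword_intersection competitor_keywords client_keywords (find_keyword_intersection competitor_keywords client_keywords)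

-- ===== LEMMAS AND PROOFS =====

-- A's fold, once started on `some s`, never returns to `none`
theorem pv_foldl_some (rest : List (String × List String)) (s : List String) :
    rest.foldl
        (fun (acc : Option (List String)) kv =>
          match acc with
          | none => some kv.2
          | some s => some (PySem.Set.inter s kv.2)) (some s)
      = some (rest.foldl (fun s kv => PySem.Set.inter s kv.2) s) := by
  induction rest generalizing s with
  | nil => rfl
  | cons p rs ih => simp [List.foldl_cons, ih]

-- folding intersections then subtracting the client set is one combined filter
theorem pv_fold_filter (rest : List (String × List String)) (cls s : List String) :
    PySem.Set.diff (rest.foldl (fun s kv => PySem.Set.inter s kv.2) s) cls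
      = s.filter (fun kw => !(cls.contains kw) && rest.all (fun p => p.2.contains kw)) := by
  induction rest generalizing s with
  | nil => simp [PySem.Set.diff]
  | cons p rs ih =>
      rw [List.foldl_cons, ih, PySem.Set.inter, List.filter_filter]
      apply List.filter_congr
      intro x _
      cases h1 : cls.contains x <;> simp [Bool.and_comm]

-- B's nested counting loop is the counter of the flattened keyword lists
theorem pv_nested_counter (cks : List (String × List String)) :
    cks.foldl
        (fun (d : PySem.Dict String Int) kv =>
          kv.2.foldl (fun d kw => d.insert kw (d.getD kw 0 + 1)) d)
        PySem.Dict.empty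
      = PySem.Dict.counter ((cks.map Prod.snd).flatten) := by
  rw [← PySem.Dict.foldl_insert_getD_add_one_eq_counter, ← List.foldl_map]
  induction cks using List.reverseRecOn with
  | nil => rfl
  | append_singleton xs x ih => simp [List.foldl_append, ih]

-- each nodup list contributes at most one occurrence
theorem pv_count_flat_le (rest : List (String × List String)) (a : String)
    (h : ∀ kv ∈ rest, kv.2.Nodup) :
    ((rest.map Prod.snd).flatten).count a ≤ rest.length := by
  induction rest with
  | nil => simp
  | cons p rs ih =>
      simp only [List.map_cons, List.flatten_cons, List.count_append, List.length_cons]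
      have h1 : p.2.count a ≤ 1 :=
        List.nodup_iff_count_le_one.mp (h p (by simp)) a
      have h2 := ih (fun kv hkv => h kv (by simp [hkv]))
      omega

-- the count reaches the number of lists exactly when every list contains a
theorem pv_count_flat_eq_iff (rest : List (String × List String)) (a : String)
    (h : ∀ kv ∈ rest, kv.2.Nodup) :
    (((rest.map Prod.snd).flatten).count a = rest.length ↔ ∀ kv ∈ rest, a ∈ kv.2) := by
  induction rest with
  | nil => simp
  | cons p rs ih =>
      simp only [List.map_cons, List.flatten_cons, List.count_append, List.length_cons,
        List.mem_cons]
      have h1 : p.2.count a ≤ 1 :=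
        List.nodup_iff_count_le_one.mp (h p (by simp)) a
      have h2 := pv_count_flat_le rs a (fun kv hkv => h kv (by simp [hkv]))
      have h3 := ih (fun kv hkv => h kv (by simp [hkv]))
      constructor
      · intro he
        have hp1 : p.2.count a = 1 := by omega
        have hmem : a ∈ p.2 := List.count_pos_iff.mp (by omega)
        intro kv hkv
        rcases hkv with rfl | hkv
        · exact hmem
        · exact (h3.mp (by omega)) kv hkv
      · intro hall
        have hmem : a ∈ p.2 := hall p (Or.inl rfl)
        have hp1 : p.2.count a = 1 := List.count_eq_one_of_mem (h p (by simp)) hmem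
        have : ((rs.map Prod.snd).flatten).count a = rs.length :=
          h3.mpr (fun kv hkv => hall kv (Or.inr hkv))
        omega

-- filtering the dedup of (xs ++ ys) by a predicate that only holds inside the
-- duplicate-free xs is filtering xs
theorem pv_filter_ofList_append (xs ys : List String) (q : String → Bool)
    (hnd : xs.Nodup) (hq : ∀ a, q a = true → a ∈ xs) :
    (PySem.Set.ofList (xs ++ ys)).filter q = xs.filter q := by
  rw [PySem.Set.ofList_append, PySem.Set.ofList_eq_self_of_nodup _ hnd,
    PySem.Set.update_eq_append_filter, List.filter_append, List.filter_filter]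
  have : ((PySem.Set.ofList ys).filter fun y => q y && !PySem.Set.contains xs y) = [] := by
    rw [List.filter_eq_nil_iff]
    intro a _ hcon
    simp only [Bool.and_eq_true, Bool.not_eq_true'] at hcon
    have := hq a hcon.1
    simp [PySem.Set.contains_eq_listContains, this] at hcon
  rw [this, List.append_nil]

-- ===== VERDICT (by name: the statement is the Claim_ definition above) =====
theorem find_keyword_intersection_spec : Claim_equal_find_keyword_intersection := by
  intro cks cls _ hpre
  unfold Spec_find_keyword_intersection find_keyword_intersection find_keyword_intersection_alt
  cases cks with
  | nil => rfl
  | cons first rest =>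
      have hndfirst : first.2.Nodup := hpre first (by simp)
      have hndrest : ∀ kv ∈ rest, kv.2.Nodup := fun kv hkv => hpre kv (by simp [hkv])
      simp only [List.isEmpty_cons, Bool.false_eq_true, if_false]
      rw [pv_nested_counter, PySem.Dict.items_counter, List.filter_map, List.map_map]
      have hcomp : (Prod.fst ∘ fun k =>
          (k, (List.count k (((first :: rest).map Prod.snd).flatten) : Int))) = id := rfl
      rw [hcomp, List.map_id]
      simp only [List.foldl_cons, pv_foldl_some, pv_fold_filter]
      have hfl : (((first :: rest).map Prod.snd).flatten)
          = first.2 ++ (rest.map Prod.snd).flatten := by simp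
      rw [hfl]
      simp only [Function.comp_def]
      -- the predicate only holds on members of the first list
      have hq : ∀ a, ((fun k => ((List.count k (first.2 ++ (rest.map Prod.snd).flatten) : Int)
              == ((first :: rest).length : Int) && !cls.contains k)) a) = true → a ∈ first.2 := by
        intro a ha
        simp only [beq_iff_eq, Bool.and_eq_true] at ha
        by_contra hna
        have h0 : first.2.count a = 0 := List.count_eq_zero.mpr hna
        have hle := pv_count_flat_le rest a hndrest
        have hc := ha.1
        simp only [List.count_append, h0, List.length_cons] at hc
        omega
      rw [pv_filter_ofList_append _ _ _ hndfirst hq,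
        PySem.Set.ofList_eq_self_of_nodup _ (hndfirst.filter _)]
      apply List.filter_congr
      intro kw hkw
      have h1 : first.2.count kw = 1 := List.count_eq_one_of_mem hndfirst hkw
      have hiff := pv_count_flat_eq_iff rest kw hndrest
      simp only [List.count_append, h1, List.length_cons]
      cases hc : cls.contains kw
      · simp only [Bool.not_false, Bool.true_and, Bool.and_true]
        rw [Bool.eq_iff_iff]
        simp only [List.all_eq_true, beq_iff_eq, List.contains_eq_mem, decide_eq_true_eq]
        constructor
        · intro hall
          have heq := hiff.mpr hall
          push_cast
          omega
        · intro he
          have hc2 : List.count kw ((rest.map Prod.snd).flatten) = rest.length := by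
            push_cast at he
            omega
          exact hiff.mp hc2
      · simp
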